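-- pv_equiv track=rewrite | github.com/oigomezz/Retos | Hackerearth/Data-Structures/Arrays/1D/Pairs-Having-Similar-Elements/solution.py | similar_elements_pairs
-- ===== SOURCE A (Python) =====
-- def similar_elements_pairs(a, n):
--     arr = sorted(a)
--     is_similar = False
--     total = count = 0
--     j = arr[0]
--     for i in arr:
--         if i == j:
--             count += 1
--         elif j + 1 == i:
--             count += 1
--             is_similar = True
--         else:
--             if is_similar:
--                 total += (count * (count - 1)) // 2
--                 is_similar = False
--             count = 1
--         j = i
--     if is_similar:
--         total += (count * (count - 1)) // 2
--     return total
-- ===== SOURCE B (Python) =====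
-- def similar_elements_pairs(a, n):
--     freq = {}
--     for x in a:
--         freq[x] = freq.get(x, 0) + 1
--     total = 0
--     for v in freq:
--         if v - 1 not in freq:
--             s = 0
--             length = 0
--             w = v
--             while w in freq:
--                 s += freq[w]
--                 length += 1
--                 w += 1
--             if length >= 2:
--                 total += s * (s - 1) // 2
--     return total
-- ===== Notes on version B (the rewrite author's own statement) =====
-- stated objective: alternative
-- what changed: Replaces A's sort-then-scan state machine by a hash-based algorithm with no sorting at all: build a frequency dict, then for each distinct value that starts a run (v-1 absent) walk v, v+1, ... through the dict summing frequencies, adding C(s,2) when the run has at least two distinct values.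
import Mathlib
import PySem

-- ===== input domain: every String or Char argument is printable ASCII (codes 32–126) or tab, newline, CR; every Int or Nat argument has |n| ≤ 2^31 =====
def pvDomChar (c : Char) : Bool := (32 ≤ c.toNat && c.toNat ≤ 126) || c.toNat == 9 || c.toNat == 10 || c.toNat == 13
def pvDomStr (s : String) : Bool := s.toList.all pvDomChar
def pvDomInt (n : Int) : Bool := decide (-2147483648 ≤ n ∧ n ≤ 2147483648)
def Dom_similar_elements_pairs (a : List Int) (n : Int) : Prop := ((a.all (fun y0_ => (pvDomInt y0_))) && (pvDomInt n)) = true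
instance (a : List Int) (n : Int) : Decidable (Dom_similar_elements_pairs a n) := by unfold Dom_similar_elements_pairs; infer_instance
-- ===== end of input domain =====

-- B drops A's sort-then-scan entirely: a frequency dict plus a consecutive-value walk from each
-- run start (v-1 absent) computes the same total (objective: alternative algorithm, no sorting).


-- ===== PORT A =====
-- one step of A's for-loop; state = (total, count, j, is_similar)
def pvStepA (s : Int × Int × Int × Bool) (i : Int) : Int × Int × Int × Bool :=
  match s with
  | (total, count, j, sim) =>
    if i = j then (total, count + 1, i, sim)
    else if j + 1 = i then (total, count + 1, i, true)
    else if sim then (total + PySem.Int.floordiv (count * (count - 1)) 2, 1, i, false)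
    else (total, 1, i, sim)

def similar_elements_pairs (a : List Int) (n : Int) : Int :=
  let arr := PySem.List.sorted a (fun x => x) false
  match arr with
  | [] => 0  -- Python raises IndexError at arr[0]; excluded by Pre_
  | j0 :: _ =>
    match arr.foldl pvStepA (0, 0, j0, false) with
    | (total, count, _, sim) =>
      if sim then total + PySem.Int.floordiv (count * (count - 1)) 2 else total

-- ===== PORT B =====
-- B's inner while loop 'while w in freq: s += freq[w]; length += 1; w += 1'.
-- fuel = number of dict keys only makes the recursion structural: the walked values are distinct
-- keys of freq, so the Python loop performs at most (number of keys) iterations and the results agree.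
-- freq[w] is read only when 'w in freq' holds, so Dict.getD is exact there.
def pvWalkB (freq : PySem.Dict Int Int) : Nat → Int → Int × Int → Int × Int
  | 0, _, sl => sl
  | fuel + 1, w, (s, l) =>
    if freq.contains w then pvWalkB freq fuel (w + 1) (s + freq.getD w 0, l + 1) else (s, l)

def similar_elements_pairs_alt (a : List Int) (n : Int) : Int :=
  let freq := a.foldl (fun d x => d.insert x (d.getD x 0 + 1)) PySem.Dict.empty
  freq.keys.foldl (fun total v =>
    if freq.contains (v - 1) = false then
      match pvWalkB freq freq.keys.length v (0, 0) with
      | (s, l) => if 2 ≤ l then total + PySem.Int.floordiv (s * (s - 1)) 2 else total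
    else total) 0

-- ===== PRECONDITION & SPEC =====
-- Python A evaluates arr[0] and raises IndexError on the empty list; Pre_ excludes exactly that.
def Pre_similar_elements_pairs (a : List Int) (n : Int) : Prop := a ≠ []
instance (a : List Int) (n : Int) : Decidable (Pre_similar_elements_pairs a n) := by unfold Pre_similar_elements_pairs; infer_instance
def pvWitness_similar_elements_pairs : List Int × Int := ([1, 1, 2], 3)

def Spec_similar_elements_pairs (a : List Int) (n : Int) (out : Int) : Prop := out = similar_elements_pairs_alt a n
instance (a : List Int) (n : Int) (out : Int) : Decidable (Spec_similar_elements_pairs a n out) := by unfold Spec_similar_elements_pairs; infer_instance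

-- ===== CLAIM (what is proved, stated in full; the proofs are below) =====
def Claim_equal_similar_elements_pairs : Prop := ∀ (a : List Int) (n : Int), Dom_similar_elements_pairs a n → Pre_similar_elements_pairs a n → Spec_similar_elements_pairs a n (similar_elements_pairs a n)

-- ===== LEMMAS AND PROOFS =====

-- C(c,2), the contribution of one similar run holding c array elements
def pvC (c : Int) : Int := PySem.Int.floordiv (c * (c - 1)) 2

-- A-side reference recursion: walk the rest of the sorted list carrying
-- (previous value, current segment length, whether the segment has two distinct values)
def pvGoC (prev cnt : Int) (sim : Bool) : List Int → Int
  | [] => if sim then pvC cnt else 0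
  | x :: t =>
      if x - prev ≤ 1 then pvGoC x (cnt + 1) (sim || decide (x ≠ prev)) t
      else (if sim then pvC cnt else 0) + pvGoC x 1 false t

-- A's finalisation step after the fold
def pvFin (s : Int × Int × Int × Bool) : Int :=
  match s with
  | (t, c, _, sim) => if sim then t + pvC c else t

-- distinct values of a sorted list after a previous value (skip duplicates)
def pvDistinct : Int → List Int → List Int
  | _, [] => []
  | p, x :: t => if x = p then pvDistinct p t else x :: pvDistinct x t

-- value-level recursion over the distinct sorted values with multiplicities c
def pvGD (c : Int → Int) (prev cnt : Int) (sim : Bool) : List Int → Int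
  | [] => if sim then pvC cnt else 0
  | v :: t =>
      if v = prev + 1 then pvGD c v (cnt + c v) true t
      else (if sim then pvC cnt else 0) + pvGD c v (c v) false t

-- length of the consecutive chain prev+1, prev+2, … at the front of a distinct sorted list
def pvRun : Int → List Int → Nat
  | _, [] => 0
  | p, v :: t => if v = p + 1 then pvRun v t + 1 else 0

-- total multiplicity of that chain
def pvRunSum (c : Int → Int) : Int → List Int → Int
  | _, [] => 0
  | p, v :: t => if v = p + 1 then c v + pvRunSum c v t else 0

-- value recursion restarted at a run boundary
def pvGDrest (c : Int → Int) : List Int → Int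
  | [] => 0
  | v :: t => pvGD c v (c v) false t

-- B's per-key contribution (the body of B's outer loop)
def pvContribB (d : PySem.Dict Int Int) (v : Int) : Int :=
  if d.contains (v - 1) = false then
    match pvWalkB d d.keys.length v (0, 0) with
    | (s, l) => if 2 ≤ l then pvC s else 0
  else 0

-- A's fold equals the reference recursion on a sorted tail
theorem pvA_fold (xs : List Int) (prev cnt total : Int) (sim : Bool)
    (h : List.Pairwise (· ≤ ·) (prev :: xs)) :
    pvFin (xs.foldl pvStepA (total, cnt, prev, sim)) = total + pvGoC prev cnt sim xs := by
  induction xs generalizing prev cnt total sim with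
  | nil => cases sim <;> simp [pvFin, pvGoC]
  | cons x t ih =>
    have hpx : prev ≤ x := (List.pairwise_cons.mp h).1 x (by simp)
    have ht : List.Pairwise (· ≤ ·) (x :: t) := (List.pairwise_cons.mp h).2
    simp only [List.foldl_cons]
    by_cases hxp : x = prev
    · subst hxp
      have hA : pvStepA (total, cnt, x, sim) x = (total, cnt + 1, x, sim) := by
        simp [pvStepA]
      have hG : pvGoC x cnt sim (x :: t) = pvGoC x (cnt + 1) sim t := by
        simp [pvGoC]
      rw [hA, hG, ih x (cnt + 1) total sim ht]
    · by_cases hx1 : x = prev + 1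
      · subst hx1
        have hA : pvStepA (total, cnt, prev, sim) (prev + 1)
            = (total, cnt + 1, prev + 1, true) := by
          simp [pvStepA, hxp]
        have hG : pvGoC prev cnt sim ((prev + 1) :: t) = pvGoC (prev + 1) (cnt + 1) true t := by
          have : ¬ (prev + 1 = prev) := by omega
          simp [pvGoC, this]
        rw [hA, hG, ih (prev + 1) (cnt + 1) total true ht]
      · have hgap : ¬ (x - prev ≤ 1) := by omega
        have hx1' : ¬ prev + 1 = x := by omega
        cases sim with
        | false =>
          have hG : pvGoC prev cnt false (x :: t) = pvGoC x 1 false t := by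
            simp [pvGoC, hgap]
          have hA : pvStepA (total, cnt, prev, false) x = (total, 1, x, false) := by
            simp [pvStepA, hxp, hx1']
          rw [hA, hG, ih x 1 total false ht]
        | true =>
          have hG : pvGoC prev cnt true (x :: t) = pvC cnt + pvGoC x 1 false t := by
            simp [pvGoC, hgap]
          have hA : pvStepA (total, cnt, prev, true) x = (total + pvC cnt, 1, x, false) := by
            simp [pvStepA, pvC, hxp, hx1']
          rw [hA, hG, ih x 1 (total + pvC cnt) false ht]
          ring

-- membership in pvDistinct
theorem pvDistinct_mem (t : List Int) (p x : Int) (h : List.Pairwise (· ≤ ·) (p :: t)) :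
    x ∈ pvDistinct p t ↔ x ∈ t ∧ p < x := by
  induction t generalizing p with
  | nil => simp [pvDistinct]
  | cons y t' ih =>
    have hpy : p ≤ y := (List.pairwise_cons.mp h).1 y (by simp)
    have ht' : List.Pairwise (· ≤ ·) (y :: t') := (List.pairwise_cons.mp h).2
    have hpt' : List.Pairwise (· ≤ ·) (p :: t') := by
      refine List.pairwise_cons.mpr ⟨?_, (List.pairwise_cons.mp ht').2⟩
      intro z hz
      exact le_trans hpy ((List.pairwise_cons.mp ht').1 z hz)
    by_cases hyp : y = p
    · subst hyp
      rw [pvDistinct, if_pos rfl, ih y hpt']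
      constructor
      · rintro ⟨hx, hlt⟩; exact ⟨by simp [hx], hlt⟩
      · rintro ⟨hx, hlt⟩
        rcases List.mem_cons.mp hx with rfl | hx
        · omega
        · exact ⟨hx, hlt⟩
    · have hplt : p < y := lt_of_le_of_ne hpy (fun e => hyp e.symm)
      rw [pvDistinct, if_neg hyp]
      rw [List.mem_cons, ih y ht']
      constructor
      · rintro (rfl | ⟨hx, hlt⟩)
        · exact ⟨by simp, hplt⟩
        · exact ⟨by simp [hx], lt_trans hplt hlt⟩
      · rintro ⟨hx, hlt⟩
        rcases List.mem_cons.mp hx with rfl | hx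
        · exact Or.inl rfl
        · have hyx : y ≤ x := (List.pairwise_cons.mp ht').1 x hx
          by_cases hxy : x = y
          · exact Or.inl hxy
          · exact Or.inr ⟨hx, lt_of_le_of_ne hyx (fun e => hxy e.symm)⟩

-- pvDistinct of a sorted list is strictly increasing
theorem pvDistinct_pairwise (t : List Int) (p : Int) (h : List.Pairwise (· ≤ ·) (p :: t)) :
    List.Pairwise (· < ·) (p :: pvDistinct p t) := by
  induction t generalizing p with
  | nil => simp [pvDistinct]
  | cons y t' ih =>
    have hpy : p ≤ y := (List.pairwise_cons.mp h).1 y (by simp)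
    have ht' : List.Pairwise (· ≤ ·) (y :: t') := (List.pairwise_cons.mp h).2
    have hpt' : List.Pairwise (· ≤ ·) (p :: t') := by
      refine List.pairwise_cons.mpr ⟨?_, (List.pairwise_cons.mp ht').2⟩
      intro z hz
      exact le_trans hpy ((List.pairwise_cons.mp ht').1 z hz)
    by_cases hyp : y = p
    · subst hyp
      rw [pvDistinct, if_pos rfl]
      exact ih y hpt'
    · have hplt : p < y := lt_of_le_of_ne hpy (fun e => hyp e.symm)
      rw [pvDistinct, if_neg hyp]
      have hy := ih y ht'
      refine List.pairwise_cons.mpr ⟨?_, hy⟩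
      intro z hz
      rcases List.mem_cons.mp hz with rfl | hz
      · exact hplt
      · have := pvDistinct_mem t' y z ht'
        exact lt_trans hplt (this.mp hz).2

-- collapse duplicates: the element recursion equals the value recursion
theorem pvC1 (c : Int → Int) (xs : List Int) (prev cnt : Int) (sim : Bool)
    (h : List.Pairwise (· ≤ ·) (prev :: xs))
    (hc : ∀ v, prev < v → c v = (xs.count v : Int)) :
    pvGoC prev cnt sim xs = pvGD c prev (cnt + (xs.count prev : Int)) sim (pvDistinct prev xs) := by
  induction xs generalizing prev cnt sim with
  | nil => cases sim <;> simp [pvGoC, pvDistinct, pvGD]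
  | cons x t ih =>
    have hpx : prev ≤ x := (List.pairwise_cons.mp h).1 x (by simp)
    have ht : List.Pairwise (· ≤ ·) (x :: t) := (List.pairwise_cons.mp h).2
    have hge : ∀ z ∈ t, x ≤ z := (List.pairwise_cons.mp ht).1
    by_cases hxp : x = prev
    · subst hxp
      have hpt : List.Pairwise (· ≤ ·) (x :: t) := ht
      have hG : pvGoC x cnt sim (x :: t) = pvGoC x (cnt + 1) sim t := by
        simp [pvGoC]
      have hcnt : ((x :: t).count x : Int) = (t.count x : Int) + 1 := by
        rw [List.count_cons_self]; push_cast; ring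
      have hc' : ∀ v, x < v → c v = (t.count v : Int) := by
        intro v hv
        have := hc v hv
        rwa [List.count_cons_of_ne (by omega)] at this
      rw [hG, ih x (cnt + 1) sim hpt hc']
      have : cnt + 1 + (t.count x : Int) = cnt + ((x :: t).count x : Int) := by
        rw [hcnt]; ring
      rw [this]
      have hDx : pvDistinct x (x :: t) = pvDistinct x t := by
        rw [pvDistinct, if_pos rfl]
      rw [hDx]
    · have hplt : prev < x := lt_of_le_of_ne hpx (fun e => hxp e.symm)
      have hcount0 : (x :: t).count prev = 0 := by
        rw [List.count_eq_zero]
        intro hmem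
        rcases List.mem_cons.mp hmem with rfl | hmem
        · omega
        · have := hge prev hmem; omega
      have hcx : c x = ((x :: t).count x : Int) := hc x hplt
      have hcxt : c x = (t.count x : Int) + 1 := by
        rw [hcx, List.count_cons_self]; push_cast; ring
      have hc' : ∀ v, x < v → c v = (t.count v : Int) := by
        intro v hv
        have := hc v (lt_trans hplt hv)
        rwa [List.count_cons_of_ne (by omega)] at this
      have hD : pvDistinct prev (x :: t) = x :: pvDistinct x t := by
        rw [pvDistinct, if_neg hxp]
      rw [hD, hcount0]
      by_cases hx1 : x = prev + 1
      · have hG : pvGoC prev cnt sim (x :: t) = pvGoC x (cnt + 1) true t := by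
          have h1 : x - prev ≤ 1 := by omega
          have h2 : (sim || decide (x ≠ prev)) = true := by simp [hxp]
          rw [pvGoC, if_pos h1, h2]
        have hGD : pvGD c prev (cnt + ((0:Nat) : Int)) sim (x :: pvDistinct x t)
            = pvGD c x (cnt + c x) true (pvDistinct x t) := by
          rw [pvGD, if_pos hx1]
          norm_num
        rw [hG, hGD, ih x (cnt + 1) true ht hc']
        have : cnt + 1 + (t.count x : Int) = cnt + c x := by rw [hcxt]; ring
        rw [this]
      · have hgap : ¬ (x - prev ≤ 1) := by omega
        have hG : pvGoC prev cnt sim (x :: t)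
            = (if sim then pvC cnt else 0) + pvGoC x 1 false t := by
          rw [pvGoC, if_neg hgap]
        have hGD : pvGD c prev (cnt + ((0:Nat) : Int)) sim (x :: pvDistinct x t)
            = (if sim then pvC cnt else 0) + pvGD c x (c x) false (pvDistinct x t) := by
          rw [pvGD, if_neg hx1]
          norm_num
        rw [hG, hGD, ih x 1 false ht hc']
        have : (1 : Int) + (t.count x : Int) = c x := by rw [hcxt]; ring
        rw [this]

-- run peeling for the value recursion, similar state
theorem pvG1 (c : Int → Int) (T : List Int) (prev cnt : Int) :
    pvGD c prev cnt true T
      = pvC (cnt + pvRunSum c prev T) + pvGDrest c (T.drop (pvRun prev T)) := by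
  induction T generalizing prev cnt with
  | nil => simp [pvGD, pvRunSum, pvRun, pvGDrest]
  | cons u T' ih =>
    by_cases hu : u = prev + 1
    · rw [pvGD, if_pos hu, ih u (cnt + c u)]
      rw [pvRunSum, if_pos hu, pvRun, if_pos hu]
      have : (u :: T').drop (pvRun u T' + 1) = T'.drop (pvRun u T') := rfl
      rw [this]
      ring_nf
    · rw [pvGD, if_neg hu, pvRunSum, if_neg hu, pvRun, if_neg hu]
      simp [pvGDrest]

-- run peeling, fresh state
theorem pvG0 (c : Int → Int) (T : List Int) (prev cnt : Int) :
    pvGD c prev cnt false T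
      = (if 1 ≤ pvRun prev T then pvC (cnt + pvRunSum c prev T) else 0)
        + pvGDrest c (T.drop (pvRun prev T)) := by
  cases T with
  | nil => simp [pvGD, pvRun, pvGDrest]
  | cons u T' =>
    by_cases hu : u = prev + 1
    · rw [pvGD, if_pos hu, pvG1 c T' u (cnt + c u)]
      rw [pvRunSum, if_pos hu, pvRun, if_pos hu]
      have h1 : 1 ≤ pvRun u T' + 1 := by omega
      rw [if_pos h1]
      have : (u :: T').drop (pvRun u T' + 1) = T'.drop (pvRun u T') := rfl
      rw [this]
      ring_nf
    · rw [pvGD, if_neg hu, pvRun, if_neg hu, pvRunSum, if_neg hu]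
      simp [pvGDrest]

theorem pvRun_le (T : List Int) (p : Int) : pvRun p T ≤ T.length := by
  induction T generalizing p with
  | nil => simp [pvRun]
  | cons u T' ih =>
    rw [pvRun]
    split
    · have := ih u; simp; omega
    · simp

-- the chained values are bounded by prev + run length
theorem pvRun_take_le (T : List Int) (p : Int) :
    ∀ u ∈ T.take (pvRun p T), u ≤ p + (pvRun p T : Int) := by
  induction T generalizing p with
  | nil => simp [pvRun]
  | cons v T' ih =>
    by_cases hv : v = p + 1
    · rw [pvRun, if_pos hv]
      intro u hu
      rw [List.take_succ_cons] at hu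
      rcases List.mem_cons.mp hu with rfl | hu
      · push_cast; omega
      · have := ih v u hu
        push_cast at this ⊢
        omega
    · rw [pvRun, if_neg hv]
      simp

-- everything after the chain lies at least two above its end
theorem pvRun_drop_gt (T : List Int) (p : Int) (h : List.Pairwise (· < ·) (p :: T)) :
    ∀ u ∈ T.drop (pvRun p T), p + (pvRun p T : Int) + 1 < u := by
  induction T generalizing p with
  | nil => simp [pvRun]
  | cons v T' ih =>
    have hpv : p < v := (List.pairwise_cons.mp h).1 v (by simp)
    have ht : List.Pairwise (· < ·) (v :: T') := (List.pairwise_cons.mp h).2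
    by_cases hv : v = p + 1
    · rw [pvRun, if_pos hv]
      intro u hu
      rw [List.drop_succ_cons] at hu
      have := ih v ht u hu
      push_cast at this ⊢
      omega
    · rw [pvRun, if_neg hv]
      intro u hu
      simp only [List.drop_zero] at hu
      rcases List.mem_cons.mp hu with rfl | hu
      · push_cast; omega
      · have hvu : v < u := (List.pairwise_cons.mp ht).1 u hu
        push_cast
        omega

-- each chained value has its predecessor in the ambient list
theorem pvRun_take_pred (TT t : List Int) (p : Int)
    (hp : p ∈ TT) (hsub : ∀ x ∈ t, x ∈ TT) :
    ∀ u ∈ t.take (pvRun p t), u - 1 ∈ TT := by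
  induction t generalizing p with
  | nil => simp [pvRun]
  | cons v t' ih =>
    by_cases hv : v = p + 1
    · rw [pvRun, if_pos hv]
      intro u hu
      rw [List.take_succ_cons] at hu
      rcases List.mem_cons.mp hu with rfl | hu
      · have : u - 1 = p := by omega
        rwa [this]
      · exact ih v (hsub v (by simp)) (fun x hx => hsub x (by simp [hx])) u hu
    · rw [pvRun, if_neg hv]
      simp

-- B's walk follows exactly the consecutive chain
theorem pvW (d : PySem.Dict Int Int) (T' : List Int) (v : Int) :
    ∀ (fuel : Nat) (s l : Int),
    List.Pairwise (· < ·) (v :: T') →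
    (∀ x : Int, v ≤ x → (d.contains x = true ↔ x ∈ v :: T')) →
    pvRun v T' + 1 ≤ fuel →
    pvWalkB d fuel v (s, l)
      = (s + d.getD v 0 + pvRunSum (fun x => d.getD x 0) v T', l + 1 + (pvRun v T' : Int)) := by
  intro fuel s l hpw hmem hfuel
  obtain ⟨f, rfl⟩ : ∃ f, fuel = f + 1 := ⟨fuel - 1, by omega⟩
  have hcv : d.contains v = true := (hmem v (le_refl v)).mpr (by simp)
  rw [pvWalkB, if_pos hcv]
  cases T' with
  | nil =>
    rw [pvRun, pvRunSum]
    have hstop : ∀ g, pvWalkB d g (v + 1) (s + d.getD v 0, l + 1) = (s + d.getD v 0, l + 1) := by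
      intro g
      cases g with
      | zero => rfl
      | succ g' =>
        have hnc : ¬ d.contains (v + 1) = true := by
          intro hcon
          have h1 : v + 1 = v := by simpa using (hmem (v + 1) (by omega)).mp hcon
          omega
        rw [pvWalkB, if_neg hnc]
    rw [hstop]
    norm_num
  | cons u T'' =>
    have hvu : v < u := (List.pairwise_cons.mp hpw).1 u (by simp)
    have htw : List.Pairwise (· < ·) (u :: T'') := (List.pairwise_cons.mp hpw).2
    by_cases hu : u = v + 1
    · rw [pvRun, if_pos hu, pvRunSum, if_pos hu]
      rw [pvRun, if_pos hu] at hfuel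
      have hmem' : ∀ x : Int, u ≤ x → (d.contains x = true ↔ x ∈ u :: T'') := by
        intro x hx
        rw [hmem x (by omega)]
        constructor
        · intro hm
          rcases List.mem_cons.mp hm with rfl | hm
          · omega
          · exact hm
        · intro hm; exact List.mem_cons_of_mem v hm
      have := pvW d T'' u f (s + d.getD v 0) (l + 1) htw hmem' (by omega)
      subst hu
      rw [this]
      simp only [Prod.mk.injEq]
      constructor
      · ring
      · push_cast; ring
    · rw [pvRun, if_neg hu, pvRunSum, if_neg hu]
      have hstop : ∀ g, pvWalkB d g (v + 1) (s + d.getD v 0, l + 1) = (s + d.getD v 0, l + 1) := by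
        intro g
        cases g with
        | zero => rfl
        | succ g' =>
          have hnc : ¬ d.contains (v + 1) = true := by
            intro hcon
            have hmm := (hmem (v + 1) (by omega)).mp hcon
            rcases List.mem_cons.mp hmm with h1 | hmm
            · omega
            · rcases List.mem_cons.mp hmm with rfl | hmm
              · omega
              · have := (List.pairwise_cons.mp htw).1 _ hmm
                omega
          rw [pvWalkB, if_neg hnc]
      rw [hstop]
      norm_num

-- core: the value recursion equals the sum of B's per-key contributions
theorem pvC2 (d : PySem.Dict Int Int) (k : Nat) :
    ∀ (T : List Int), T.length ≤ k → T.length ≤ d.keys.length →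
    List.Pairwise (· < ·) T →
    (∀ x : Int, (∃ u ∈ T, u ≤ x + 1) → (d.contains x = true ↔ x ∈ T)) →
    pvGDrest (fun x => d.getD x 0) T = (T.map (pvContribB d)).sum := by
  induction k with
  | zero =>
    intro T hk _ _ _
    have : T = [] := List.eq_nil_of_length_eq_zero (by omega)
    subst this
    simp [pvGDrest]
  | succ k ih =>
    intro T hk hkd hpw hmem
    cases T with
    | nil => simp [pvGDrest]
    | cons v t =>
      have htw : List.Pairwise (· < ·) (v :: t) := hpw
      have hvt : ∀ z ∈ t, v < z := (List.pairwise_cons.mp hpw).1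
      have htpw : List.Pairwise (· < ·) t := (List.pairwise_cons.mp hpw).2
      -- B's contribution of the run start v
      have hnc : d.contains (v - 1) = false := by
        have hiff := hmem (v - 1) ⟨v, by simp, by omega⟩
        rcases Bool.eq_false_or_eq_true (d.contains (v - 1)) with ht | hf
        · exfalso
          have hm := hiff.mp ht
          rcases List.mem_cons.mp hm with h1 | h1
          · omega
          · have := hvt _ h1; omega
        · exact hf
      have hwalkmem : ∀ x : Int, v ≤ x → (d.contains x = true ↔ x ∈ v :: t) := by
        intro x hx
        exact hmem x ⟨v, by simp, by omega⟩
      have hfuel : pvRun v t + 1 ≤ d.keys.length := by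
        have := pvRun_le t v
        simp only [List.length_cons] at hkd
        omega
      have hwalk := pvW d t v d.keys.length 0 0 htw hwalkmem hfuel
      have hcontrib : pvContribB d v
          = (if 1 ≤ pvRun v t then
               pvC (d.getD v 0 + pvRunSum (fun x => d.getD x 0) v t) else 0) := by
        rw [pvContribB, if_pos hnc, hwalk]
        dsimp only
        by_cases hr : 1 ≤ pvRun v t
        · rw [if_pos (show (2:Int) ≤ 0 + 1 + (pvRun v t : Int) by push_cast; omega), if_pos hr]
          norm_num
        · rw [if_neg (show ¬ (2:Int) ≤ 0 + 1 + (pvRun v t : Int) by push_cast; omega), if_neg hr]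
      -- contributions of the rest of the run vanish
      have hzero : ∀ u ∈ t.take (pvRun v t), pvContribB d u = 0 := by
        intro u hu
        have hpred : u - 1 ∈ v :: t :=
          pvRun_take_pred (v :: t) t v (by simp) (fun x hx => by simp [hx]) u hu
        have hut : u ∈ t := List.mem_of_mem_take hu
        have hcon : d.contains (u - 1) = true := by
          refine (hmem (u - 1) ⟨u - 1, hpred, by omega⟩).mpr hpred
        rw [pvContribB]
        rw [hcon]
        simp
      -- the suffix after the run
      have hmem' : ∀ x : Int, (∃ u ∈ t.drop (pvRun v t), u ≤ x + 1) →
          (d.contains x = true ↔ x ∈ t.drop (pvRun v t)) := by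
        rintro x ⟨u, hu, hux⟩
        have hgt := pvRun_drop_gt t v hpw u hu
        have hut : u ∈ t := List.mem_of_mem_drop hu
        rw [hmem x ⟨u, by simp [hut], hux⟩]
        constructor
        · intro hx
          rcases List.mem_cons.mp hx with rfl | hx
          · exfalso; omega
          · conv at hx => rw [← List.take_append_drop (pvRun v t) t]
            rcases List.mem_append.mp hx with hx | hx
            · exfalso
              have := pvRun_take_le t v x hx
              omega
            · exact hx
        · intro hx
          exact List.mem_cons_of_mem v (List.mem_of_mem_drop hx)
      have hrec := ih (t.drop (pvRun v t))
        (by have := List.length_drop (l := t) (i := pvRun v t); simp at hk ⊢; omega)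
        (by have := List.length_drop (l := t) (i := pvRun v t); simp at hkd ⊢; omega)
        htpw.drop hmem'
      -- assemble
      have hsplit : t = t.take (pvRun v t) ++ t.drop (pvRun v t) :=
        (List.take_append_drop _ _).symm
      calc pvGDrest (fun x => d.getD x 0) (v :: t)
          = pvGD (fun x => d.getD x 0) v (d.getD v 0) false t := rfl
        _ = (if 1 ≤ pvRun v t then
               pvC (d.getD v 0 + pvRunSum (fun x => d.getD x 0) v t) else 0)
            + pvGDrest (fun x => d.getD x 0) (t.drop (pvRun v t)) := pvG0 _ _ _ _
        _ = pvContribB d v + ((t.drop (pvRun v t)).map (pvContribB d)).sum := by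
            rw [hcontrib, hrec]
        _ = (List.map (pvContribB d) (v :: t)).sum := by
            conv_rhs => rw [hsplit]
            simp only [List.map_cons, List.map_append, List.sum_cons, List.sum_append]
            have hz : ((t.take (pvRun v t)).map (pvContribB d)).sum = 0 := by
              apply List.sum_eq_zero
              intro x hx
              rcases List.mem_map.mp hx with ⟨u, hu, rfl⟩
              exact hzero u hu
            rw [hz]
            ring

-- B's outer fold is the sum of the per-key contributions
theorem pvB_fold (d : PySem.Dict Int Int) (ks : List Int) (tot : Int) :
    ks.foldl (fun total v =>
      if d.contains (v - 1) = false then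
        match pvWalkB d d.keys.length v (0, 0) with
        | (s, l) => if 2 ≤ l then total + PySem.Int.floordiv (s * (s - 1)) 2 else total
      else total) tot = tot + (ks.map (pvContribB d)).sum := by
  induction ks generalizing tot with
  | nil => simp
  | cons v ks' ih =>
    simp only [List.foldl_cons, List.map_cons, List.sum_cons]
    have hstep : (if d.contains (v - 1) = false then
        match pvWalkB d d.keys.length v (0, 0) with
        | (s, l) => if 2 ≤ l then tot + PySem.Int.floordiv (s * (s - 1)) 2 else tot
      else tot) = tot + pvContribB d v := by
      rw [pvContribB]
      rcases hw : pvWalkB d d.keys.length v (0, 0) with ⟨s, l⟩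
      by_cases hc : d.contains (v - 1) = false
      · rw [if_pos hc, if_pos hc]
        dsimp only
        by_cases h2 : (2 : Int) ≤ l
        · rw [if_pos h2, if_pos h2]; rfl
        · rw [if_neg h2, if_neg h2]; ring
      · rw [if_neg hc, if_neg hc]; ring
    rw [hstep, ih]
    ring

-- ===== VERDICT (by name: the statement is the Claim_ definition above) =====
theorem similar_elements_pairs_spec : Claim_equal_similar_elements_pairs := by
  intro a n _ hpre
  unfold Spec_similar_elements_pairs similar_elements_pairs similar_elements_pairs_alt
  have hfreq : a.foldl (fun d x => d.insert x (d.getD x 0 + 1)) PySem.Dict.empty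
      = PySem.Dict.counter a := PySem.Dict.foldl_insert_getD_add_one_eq_counter a
  have hs : List.Pairwise (· ≤ ·) (PySem.List.sorted a (fun x => x) false) := by
    have := PySem.List.sorted_pairwise a (fun x => x)
    simpa using this
  have hne : PySem.List.sorted a (fun x => x) false ≠ [] := by
    intro hnil
    have hperm := PySem.List.sorted_perm a (fun x => x) false
    rw [hnil] at hperm
    exact hpre (List.Perm.eq_nil hperm.symm)
  cases harr : PySem.List.sorted a (fun x => x) false with
  | nil => exact absurd harr hne
  | cons j0 t =>
    rw [harr] at hs
    dsimp only
    rw [hfreq]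
    set d := PySem.Dict.counter a with hd
    -- counts agree between a, arr and d
    have hcntarr : ∀ v : Int, a.count v = (j0 :: t).count v := by
      intro v
      have hperm := PySem.List.sorted_perm a (fun x => x) false
      rw [harr] at hperm
      exact (hperm.count_eq v).symm
    have hgetD : ∀ v : Int, d.getD v 0 = (a.count v : Int) := fun v =>
      PySem.Dict.getD_counter a v
    -- membership agrees between a, arr and D0
    have hmema : ∀ x : Int, x ∈ a ↔ x ∈ j0 :: t := by
      intro x
      rw [← harr]
      exact (PySem.List.mem_sorted a (fun x => x) false x).symm
    have hmemD0 : ∀ x : Int, x ∈ j0 :: pvDistinct j0 t ↔ x ∈ a := by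
      intro x
      rw [hmema x, List.mem_cons, List.mem_cons, pvDistinct_mem t j0 x hs]
      constructor
      · rintro (rfl | ⟨hx, _⟩)
        · exact Or.inl rfl
        · exact Or.inr hx
      · rintro (rfl | hx)
        · exact Or.inl rfl
        · by_cases hxj : x = j0
          · exact Or.inl hxj
          · have : j0 ≤ x := (List.pairwise_cons.mp hs).1 x hx
            exact Or.inr ⟨hx, lt_of_le_of_ne this (fun e => hxj e.symm)⟩
    -- keys of the counter are a permutation of D0
    have hD0pw : List.Pairwise (· < ·) (j0 :: pvDistinct j0 t) := pvDistinct_pairwise t j0 hs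
    have hD0nd : (j0 :: pvDistinct j0 t).Nodup := hD0pw.imp ne_of_lt
    have hkeys : d.keys = PySem.Set.ofList a := PySem.Dict.keys_counter a
    have hpermk : d.keys.Perm (j0 :: pvDistinct j0 t) := by
      rw [hkeys]
      refine (List.perm_ext_iff_of_nodup (PySem.Set.nodup_ofList a) hD0nd).mpr ?_
      intro x
      rw [PySem.Set.mem_ofList, hmemD0]
    -- A's fold equals the value recursion
    have hstep : pvStepA (0, 0, j0, false) j0 = (0, 1, j0, false) := by simp [pvStepA]
    have hc1 : ∀ v : Int, j0 < v → d.getD v 0 = (t.count v : Int) := by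
      intro v hv
      rw [hgetD v, hcntarr v, List.count_cons_of_ne (by omega)]
    have hAside : pvFin (List.foldl pvStepA (0, 1, j0, false) t)
        = pvGDrest (fun x => d.getD x 0) (j0 :: pvDistinct j0 t) := by
      rw [pvA_fold t j0 1 0 false hs, pvC1 (fun x => d.getD x 0) t j0 1 false hs hc1]
      have hj0 : (1 : Int) + (t.count j0 : Int) = d.getD j0 0 := by
        rw [hgetD j0, hcntarr j0, List.count_cons_self]
        push_cast
        ring
      rw [zero_add, hj0]
      rfl
    -- B's fold equals the same sum via pvC2
    have hmemC2 : ∀ x : Int, (∃ u ∈ j0 :: pvDistinct j0 t, u ≤ x + 1) →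
        (d.contains x = true ↔ x ∈ j0 :: pvDistinct j0 t) := by
      intro x _
      rw [hd, PySem.Dict.contains_counter a x, List.contains_iff_mem, hmemD0 x]
    have hlen : (j0 :: pvDistinct j0 t).length ≤ d.keys.length := by
      rw [hpermk.length_eq]
    have hc2 := pvC2 d (j0 :: pvDistinct j0 t).length (j0 :: pvDistinct j0 t)
      (le_refl _) hlen hD0pw hmemC2
    rw [pvB_fold d d.keys 0]
    show pvFin (List.foldl pvStepA (pvStepA (0, 0, j0, false) j0) t) = _
    rw [hstep, hAside, hc2, zero_add]
    exact ((hpermk.map (pvContribB d)).sum_eq).symm
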